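-- pv_equiv track=rewrite | github.com/Cecilia520/algorithmic-learning-leetcode | cecilia-python/剑指offer/chapter-1/CutRope-2.py | CutRope2
-- ===== SOURCE A (Python) =====
-- def CutRope2(n) -> int:
--     """
--     剪绳子-2
--     快速幂求余法
--     :param n:
--     :return:
--     """
--     if n <= 3:
--         return n - 1
--     a, b, x, p, reminder = n // 3 - 1, n % 3, 3, 1000000007, 1
--     # 快速幂求余
--     while a > 0:
--         if a % 2:
--             reminder = (reminder * x) % p
--         x = x ** 2 % p
--         a //= 2
--     if b == 0:
--         return (reminder * 3) % p  # 3^(a+1) % p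
--     if b == 1:
--         return (reminder * 4) % p  # 3^a * 4 % p
--     return (reminder * 6) % p  # 3^(a+1) * 2 % p
-- ===== SOURCE B (Python) =====
-- def CutRope2(n) -> int:
--     if n <= 3:
--         return n - 1
--     a, b, p = n // 3 - 1, n % 3, 1000000007
--
--     def bits(e):
--         # binary digits of e, most significant first
--         return bits(e // 2) + [e % 2] if e else []
--
--     # left-to-right binary exponentiation of 3^a: square, then multiply on set bits
--     reminder = 1
--     for bit in bits(a):
--         reminder = reminder * reminder % p
--         if bit:
--             reminder = reminder * 3 % p
--     if b == 0:
--         return reminder * 3 % p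
--     if b == 1:
--         return reminder * 4 % p
--     return reminder * 6 % p
-- ===== Notes on version B (the rewrite author's own statement) =====
-- stated objective: alternative
-- what changed: Replaces A's right-to-left square-and-multiply while-loop (a running base x, parity test while halving the exponent in place) by left-to-right binary exponentiation: the exponent's bit list is built first (MSB-first) and one fold squares the accumulator and multiplies by 3 on set bits; the small-n guard and final remainder case split stay.
import Mathlib
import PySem

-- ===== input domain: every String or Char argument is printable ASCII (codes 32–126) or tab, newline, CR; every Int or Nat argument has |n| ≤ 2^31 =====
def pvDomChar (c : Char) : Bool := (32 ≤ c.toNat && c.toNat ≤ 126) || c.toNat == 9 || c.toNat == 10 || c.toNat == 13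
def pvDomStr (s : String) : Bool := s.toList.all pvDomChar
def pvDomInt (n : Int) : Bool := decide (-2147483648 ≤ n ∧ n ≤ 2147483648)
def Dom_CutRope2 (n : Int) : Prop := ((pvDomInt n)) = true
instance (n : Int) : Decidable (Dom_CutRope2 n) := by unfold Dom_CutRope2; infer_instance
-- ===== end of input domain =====

-- B replaces A's right-to-left square-and-multiply loop by left-to-right binary
-- exponentiation over the exponent's MSB-first bit list (objective: alternative; similar cost).

-- ===== PORT A =====
-- A's while-loop `while a > 0: …; a //= 2`.  On the only reachable path a ≥ 0, so the
-- counter is carried as a Nat (a % 2 and a // 2 on a nonnegative int coincide with Nat.mod/div).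
def pvFastLoop (a : Nat) (x reminder : Int) : Int :=
  if a = 0 then reminder
  else
    let reminder' := if a % 2 ≠ 0 then PySem.Int.mod (reminder * x) 1000000007 else reminder
    pvFastLoop (a / 2) (PySem.Int.mod (x ^ 2) 1000000007) reminder'
decreasing_by exact Nat.div_lt_self (Nat.pos_of_ne_zero (by assumption)) (by norm_num)

def CutRope2 (n : Int) : Int :=
  if n ≤ 3 then n - 1
  else
    let a := PySem.Int.floordiv n 3 - 1   -- a ≥ 0 since n ≥ 4
    let b := PySem.Int.mod n 3
    let reminder := pvFastLoop a.toNat 3 1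
    if b = 0 then PySem.Int.mod (reminder * 3) 1000000007
    else if b = 1 then PySem.Int.mod (reminder * 4) 1000000007
    else PySem.Int.mod (reminder * 6) 1000000007

-- ===== PORT B =====
-- B's helper `bits(e)`: binary digits MSB-first (e ≥ 0 on the reachable path, as a Nat),
-- then the for-loop over the bits as a foldl of the square-then-multiply step.
def pvBits (e : Nat) : List Nat :=
  if e = 0 then [] else pvBits (e / 2) ++ [e % 2]
decreasing_by exact Nat.div_lt_self (Nat.pos_of_ne_zero (by assumption)) (by norm_num)

def pvSqStep (r : Int) (bit : Nat) : Int :=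
  let r2 := PySem.Int.mod (r * r) 1000000007
  if bit ≠ 0 then PySem.Int.mod (r2 * 3) 1000000007 else r2

def CutRope2_alt (n : Int) : Int :=
  if n ≤ 3 then n - 1
  else
    let b := PySem.Int.mod n 3
    let reminder := (pvBits (PySem.Int.floordiv n 3 - 1).toNat).foldl pvSqStep 1
    if b = 0 then PySem.Int.mod (reminder * 3) 1000000007
    else if b = 1 then PySem.Int.mod (reminder * 4) 1000000007
    else PySem.Int.mod (reminder * 6) 1000000007

-- ===== PRECONDITION & SPEC =====
def Spec_CutRope2 (n : Int) (out : Int) : Prop := out = CutRope2_alt n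
instance (n : Int) (out : Int) : Decidable (Spec_CutRope2 n out) := by unfold Spec_CutRope2; infer_instance

-- ===== CLAIM =====
def Claim_equal_CutRope2 : Prop := ∀ (n : Int), Dom_CutRope2 n → Spec_CutRope2 n (CutRope2 n)

-- ===== LEMMAS AND PROOFS =====

theorem pvmod_eq (t : Int) : PySem.Int.mod t 1000000007 = t % 1000000007 :=
  PySem.Int.mod_eq_emod_of_pos (by norm_num)

theorem pvmod_modeq (t : Int) : t % 1000000007 ≡ t [ZMOD 1000000007] :=
  Int.emod_emod_of_dvd t dvd_rfl

theorem pvFastLoop_modeq (a : Nat) (x r : Int) :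
    pvFastLoop a x r ≡ r * x ^ a [ZMOD 1000000007] := by
  induction a using Nat.strong_induction_on generalizing x r with
  | _ a ih =>
    rw [pvFastLoop]
    by_cases h : a = 0
    · simp [h]
    · simp only [if_neg h, pvmod_eq]
      have hlt : a / 2 < a := Nat.div_lt_self (Nat.pos_of_ne_zero h) (by norm_num)
      have ih' := ih (a / 2) hlt
      have hx2 : ((x ^ 2 % 1000000007) : Int) ^ (a / 2) ≡ x ^ (2 * (a / 2)) [ZMOD 1000000007] := by
        have := (pvmod_modeq (x ^ 2)).pow (a / 2)
        calc ((x ^ 2 % 1000000007) : Int) ^ (a / 2)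
            ≡ (x ^ 2) ^ (a / 2) [ZMOD 1000000007] := this
          _ = x ^ (2 * (a / 2)) := by rw [← pow_mul]
      set r' : Int := if a % 2 ≠ 0 then (r * x) % 1000000007 else r with hr'
      have hr'c : r' ≡ r * x ^ (a % 2) [ZMOD 1000000007] := by
        rcases Nat.mod_two_eq_zero_or_one a with h2 | h2 <;> simp [hr', h2]
        exact pvmod_modeq (r * x)
      calc pvFastLoop (a / 2) (x ^ 2 % 1000000007) r'
          ≡ r' * (x ^ 2 % 1000000007) ^ (a / 2) [ZMOD 1000000007] := ih' _ _
        _ ≡ (r * x ^ (a % 2)) * x ^ (2 * (a / 2)) [ZMOD 1000000007] := hr'c.mul hx2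
        _ = r * x ^ a := by
            rw [mul_assoc, ← pow_add]
            congr 2
            omega

theorem pvSq_modeq (e : Nat) : (pvBits e).foldl pvSqStep 1 ≡ 3 ^ e [ZMOD 1000000007] := by
  induction e using Nat.strong_induction_on with
  | _ e ih =>
    rw [pvBits]
    by_cases h : e = 0
    · simp [h]
    · simp only [if_neg h, List.foldl_append, List.foldl_cons, List.foldl_nil]
      have hlt : e / 2 < e := Nat.div_lt_self (Nat.pos_of_ne_zero h) (by norm_num)
      have ih' := ih (e / 2) hlt
      set r : Int := (pvBits (e / 2)).foldl pvSqStep 1 with hr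
      have hsq : PySem.Int.mod (r * r) 1000000007 ≡ 3 ^ (2 * (e / 2)) [ZMOD 1000000007] := by
        rw [pvmod_eq]
        calc r * r % 1000000007
            ≡ r * r [ZMOD 1000000007] := pvmod_modeq _
          _ ≡ 3 ^ (e / 2) * 3 ^ (e / 2) [ZMOD 1000000007] := ih'.mul ih'
          _ = 3 ^ (2 * (e / 2)) := by rw [two_mul, pow_add]
      unfold pvSqStep
      rcases Nat.mod_two_eq_zero_or_one e with h2 | h2
      · have he : 2 * (e / 2) = e := by omega
        simpa [h2, he] using hsq
      · have he : 2 * (e / 2) + 1 = e := by omega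
        simp only [h2, ne_eq, one_ne_zero, not_false_eq_true, if_true]
        rw [pvmod_eq]
        calc PySem.Int.mod (r * r) 1000000007 * 3 % 1000000007
            ≡ PySem.Int.mod (r * r) 1000000007 * 3 [ZMOD 1000000007] := pvmod_modeq _
          _ ≡ 3 ^ (2 * (e / 2)) * 3 [ZMOD 1000000007] := hsq.mul_right 3
          _ = 3 ^ e := by rw [← pow_succ, he]

-- ===== VERDICT =====
theorem CutRope2_spec : Claim_equal_CutRope2 := by
  intro n _
  unfold Spec_CutRope2 CutRope2 CutRope2_alt
  by_cases h : n ≤ 3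
  · simp [h]
  · simp only [if_neg h]
    set a : Nat := (PySem.Int.floordiv n 3 - 1).toNat with ha
    have hcong : pvFastLoop a 3 1 ≡ (pvBits a).foldl pvSqStep 1 [ZMOD 1000000007] := by
      have h1 : pvFastLoop a 3 1 ≡ 3 ^ a [ZMOD 1000000007] := by
        simpa using pvFastLoop_modeq a 3 1
      exact h1.trans (pvSq_modeq a).symm
    split_ifs
    · rw [pvmod_eq, pvmod_eq]; exact hcong.mul_right 3
    · rw [pvmod_eq, pvmod_eq]; exact hcong.mul_right 4
    · rw [pvmod_eq, pvmod_eq]; exact hcong.mul_right 6
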